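-- pv_equiv track=rewrite | github.com/zazabap/problem-reductions | docs/paper/verify-reductions/verify_k_satisfiability_disjoint_connecting_paths.py | is_valid_target
-- ===== SOURCE A (Python) =====
-- def is_valid_target(num_vertices: int, edges: list[tuple[int, int]],
--                     terminal_pairs: list[tuple[int, int]]) -> bool:
--     """Validate a Disjoint Connecting Paths instance."""
--     if num_vertices < 2:
--         return False
--     if len(terminal_pairs) < 1:
--         return False
--     for u, v in edges:
--         if u < 0 or u >= num_vertices or v < 0 or v >= num_vertices:
--             return False
--         if u == v:
--             return False
--     all_terminals: set[int] = set()
--     for s, t in terminal_pairs: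
--         if s < 0 or s >= num_vertices or t < 0 or t >= num_vertices:
--             return False
--         if s == t:
--             return False
--         if s in all_terminals or t in all_terminals:
--             return False
--         all_terminals.add(s)
--         all_terminals.add(t)
--     return True
-- ===== SOURCE B (Python) =====
-- def is_valid_target(num_vertices: int, edges: list[tuple[int, int]],
--                     terminal_pairs: list[tuple[int, int]]) -> bool:
--     """Validate a Disjoint Connecting Paths instance (sort-then-adjacent-scan)."""
--     if num_vertices < 2 or not terminal_pairs:
--         return False
--     for u, v in edges:
--         if not (0 <= u < num_vertices and 0 <= v < num_vertices and u != v):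
--             return False
--     for s, t in terminal_pairs:
--         if not (0 <= s < num_vertices and 0 <= t < num_vertices and s != t):
--             return False
--     terms = sorted(x for st in terminal_pairs for x in st)
--     return all(a != b for a, b in zip(terms, terms[1:]))
-- ===== Notes on version B (the rewrite author's own statement) =====
-- stated objective: alternative
-- what changed: Terminal uniqueness is checked by a different algorithm: instead of A's incremental membership set with early exit inside the pair loop, B first validates each pair (range, s!=t), then flattens all endpoints, sorts them, and scans adjacent sorted elements for equality.
import Mathlib
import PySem

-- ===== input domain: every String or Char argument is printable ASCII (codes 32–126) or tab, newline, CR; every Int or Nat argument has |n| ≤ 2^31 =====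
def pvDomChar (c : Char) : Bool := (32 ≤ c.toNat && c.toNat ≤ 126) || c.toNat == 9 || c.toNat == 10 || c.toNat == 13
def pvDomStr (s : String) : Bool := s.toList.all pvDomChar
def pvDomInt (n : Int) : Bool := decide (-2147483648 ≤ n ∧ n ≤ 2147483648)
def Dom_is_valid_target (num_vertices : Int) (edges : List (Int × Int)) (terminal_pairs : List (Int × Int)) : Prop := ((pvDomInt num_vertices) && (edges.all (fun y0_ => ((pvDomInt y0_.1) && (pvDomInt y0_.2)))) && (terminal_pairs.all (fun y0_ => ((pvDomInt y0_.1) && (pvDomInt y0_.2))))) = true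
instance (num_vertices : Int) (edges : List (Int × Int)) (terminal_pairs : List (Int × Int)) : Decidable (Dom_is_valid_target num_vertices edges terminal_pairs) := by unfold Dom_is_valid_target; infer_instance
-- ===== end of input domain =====

-- B checks terminal uniqueness by sort-then-adjacent-scan instead of A's incremental
-- membership set with early exit; objective: alternative (same task, different algorithm).


-- ===== PORT A =====
-- the terminal loop: incremental 'all_terminals' set with early exit
def pvATerm (n : Int) (seen : PySem.Set Int) : List (Int × Int) → Bool
  | [] => true
  | (s, t) :: rest =>
    if s < 0 || s ≥ n || t < 0 || t ≥ n then false
    else if s == t then false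
    else if PySem.Set.contains seen s || PySem.Set.contains seen t then false
    else pvATerm n (PySem.Set.add (PySem.Set.add seen s) t) rest

-- the edges loop; on normal exit control falls through to the terminal loop
def pvAEdges (n : Int) (tps : List (Int × Int)) : List (Int × Int) → Bool
  | [] => pvATerm n PySem.Set.empty tps
  | (u, v) :: rest =>
    if u < 0 || u ≥ n || v < 0 || v ≥ n then false
    else if u == v then false
    else pvAEdges n tps rest

def is_valid_target (num_vertices : Int) (edges : List (Int × Int)) (terminal_pairs : List (Int × Int)) : Bool :=
  if num_vertices < 2 then false
  else if terminal_pairs.length < 1 then false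
  else pvAEdges num_vertices terminal_pairs edges

-- ===== PORT B =====
-- B's edges loop: return False on a bad edge, fall through otherwise
def pvBEdges (n : Int) : List (Int × Int) → Bool
  | [] => true
  | (u, v) :: rest =>
    if !(decide (0 ≤ u) && decide (u < n) && decide (0 ≤ v) && decide (v < n) && (u != v)) then false
    else pvBEdges n rest

-- B's terminal-pair loop: each pair validated for range and s != t only
def pvBTerms (n : Int) : List (Int × Int) → Bool
  | [] => true
  | (s, t) :: rest =>
    if !(decide (0 ≤ s) && decide (s < n) && decide (0 ≤ t) && decide (t < n) && (s != t)) then false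
    else pvBTerms n rest

def is_valid_target_alt (num_vertices : Int) (edges : List (Int × Int)) (terminal_pairs : List (Int × Int)) : Bool :=
  if num_vertices < 2 || terminal_pairs.isEmpty then false
  else if !(pvBEdges num_vertices edges) then false
  else if !(pvBTerms num_vertices terminal_pairs) then false
  else
    let terms := PySem.List.sorted (terminal_pairs.flatMap (fun st => [st.1, st.2])) (fun x => x) false
    (terms.zip (terms.drop 1)).all (fun p => p.1 != p.2)

-- ===== PRECONDITION & SPEC =====
def Spec_is_valid_target (num_vertices : Int) (edges : List (Int × Int)) (terminal_pairs : List (Int × Int)) (out : Bool) : Prop := out = is_valid_target_alt num_vertices edges terminal_pairs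
instance (num_vertices : Int) (edges : List (Int × Int)) (terminal_pairs : List (Int × Int)) (out : Bool) : Decidable (Spec_is_valid_target num_vertices edges terminal_pairs out) := by unfold Spec_is_valid_target; infer_instance

-- ===== CLAIM (what is proved, stated in full; the proofs are below) =====
def Claim_equal_is_valid_target : Prop := ∀ (num_vertices : Int) (edges : List (Int × Int)) (terminal_pairs : List (Int × Int)), Dom_is_valid_target num_vertices edges terminal_pairs → Spec_is_valid_target num_vertices edges terminal_pairs (is_valid_target num_vertices edges terminal_pairs)

-- ===== LEMMAS AND PROOFS =====

-- on a ≤-sorted list, "no two adjacent elements equal" decides Nodup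
theorem pv_adj_nodup : ∀ (l : List Int), l.Pairwise (· ≤ ·) →
    ((l.zip (l.drop 1)).all (fun p => p.1 != p.2)) = decide l.Nodup
  | [], _ => by decide
  | [a], _ => by simp
  | a :: b :: rest, h => by
    have htail : (b :: rest).Pairwise (· ≤ ·) := h.tail
    have hb : ∀ x ∈ b :: rest, a ≤ x := fun x hx => (List.pairwise_cons.1 h).1 x hx
    have ih := pv_adj_nodup (b :: rest) htail
    simp only [List.drop_succ_cons, List.drop_zero, List.zip_cons_cons, List.all_cons] at *
    rw [ih]
    by_cases hab : a = b
    · subst hab; simp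
    · have hne : (a != b) = true := by simp [hab]
      rw [hne, Bool.true_and, Bool.eq_iff_iff]
      simp only [decide_eq_true_eq, List.nodup_cons]
      constructor
      · intro hnd
        refine ⟨?_, hnd⟩
        intro hmem
        rcases List.mem_cons.1 hmem with h | h
        · exact hab h
        · have h1 : a ≤ b := hb b (List.mem_cons_self ..)
          have h2 : b ≤ a := (List.pairwise_cons.1 htail).1 a h
          exact hab (le_antisymm h1 h2)
      · exact fun hnd => hnd.2

-- A's terminal loop with a duplicate-free 'seen' set = B's pair validation,
-- together with freshness of all endpoints (seen ++ flattened endpoints nodup)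
theorem pv_term_key (n : Int) :
    ∀ (tps : List (Int × Int)) (seen : List Int), seen.Nodup →
      pvATerm n seen tps
        = (pvBTerms n tps && decide ((seen ++ tps.flatMap (fun st => [st.1, st.2])).Nodup)) := by
  intro tps
  induction tps with
  | nil => intro seen hseen; simp [pvATerm, pvBTerms, hseen]
  | cons p rest ih =>
    intro seen hseen
    obtain ⟨s, t⟩ := p
    by_cases hr : s < 0 ∨ n ≤ s ∨ t < 0 ∨ n ≤ t
    · have hA : (s < 0 || s ≥ n || t < 0 || t ≥ n) = true := by
        simp only [Bool.or_eq_true, decide_eq_true_eq, ge_iff_le]; tauto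
      have hB : (!(decide (0 ≤ s) && decide (s < n) && decide (0 ≤ t) && decide (t < n) && (s != t))) = true := by
        simp only [Bool.not_eq_true', Bool.and_eq_false_iff, decide_eq_false_iff_not, not_le, not_lt]
        rcases hr with h | h | h | h
        · left; left; left; left; omega
        · left; left; left; right; omega
        · left; left; right; omega
        · left; right; omega
      simp [pvATerm, pvBTerms, hA, hB]
    · push_neg at hr
      obtain ⟨h1, h2, h3, h4⟩ := hr
      have hA : (s < 0 || s ≥ n || t < 0 || t ≥ n) = false := by
        simp only [Bool.or_eq_false_iff, decide_eq_false_iff_not, ge_iff_le, not_lt, not_le]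
        exact ⟨⟨⟨h1, h2⟩, h3⟩, h4⟩
      by_cases hst : s = t
      · simp [pvATerm, pvBTerms, hA, hst]
      · have hB : (!(decide (0 ≤ s) && decide (s < n) && decide (0 ≤ t) && decide (t < n) && (s != t))) = false := by
          simp [h1, h2, h3, h4, hst]
        simp only [pvATerm, pvBTerms, hA, hB, Bool.false_eq_true, if_false]
        by_cases hmem : s ∈ seen ∨ t ∈ seen
        · have hc : (PySem.Set.contains seen s || PySem.Set.contains seen t) = true := by
            simp only [Bool.or_eq_true, PySem.Set.contains_eq_listContains, List.contains_iff_mem]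
            tauto
          simp only [hc, if_true]
          have hnd : ¬ (seen ++ ((s, t) :: rest).flatMap (fun st => [st.1, st.2])).Nodup := by
            intro h
            simp only [List.flatMap_cons] at h
            rw [List.nodup_append] at h
            rcases hmem with hm | hm
            · exact h.2.2 s hm s (by simp) rfl
            · exact h.2.2 t hm t (by simp) rfl
          rw [decide_eq_false hnd]
          simp
        · push_neg at hmem
          obtain ⟨hs, ht⟩ := hmem
          have hc : (PySem.Set.contains seen s || PySem.Set.contains seen t) = false := by
            simp [hs, ht]
          simp only [hc, if_false, Bool.false_eq_true]
          have hadd : PySem.Set.add (PySem.Set.add seen s) t = seen ++ [s] ++ [t] := by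
            rw [PySem.Set.add_of_not_mem hs, PySem.Set.add_of_not_mem (by simp [ht, Ne.symm hst])]
          have hnd2 : (seen ++ [s] ++ [t]).Nodup := by
            rw [List.append_assoc, List.nodup_append]
            refine ⟨hseen, by simp [hst], ?_⟩
            intro a ha b hb
            simp only [List.singleton_append, List.mem_cons, List.not_mem_nil, or_false] at hb
            rcases hb with rfl | rfl
            · exact fun h => hs (h ▸ ha)
            · exact fun h => ht (h ▸ ha)
          rw [hadd, ih _ hnd2]
          have heq : seen ++ [s] ++ [t] ++ rest.flatMap (fun st => [st.1, st.2])
              = seen ++ ((s, t) :: rest).flatMap (fun st => [st.1, st.2]) := by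
            simp [List.flatMap_cons]
          rw [heq]
          simp [hst]

-- the per-edge tests of A and B agree
theorem pv_edge_ok (n u v : Int) :
    (decide (0 ≤ u) && decide (u < n) && decide (0 ≤ v) && decide (v < n) && (u != v))
      = (!(u < 0 || u ≥ n || v < 0 || v ≥ n) && !(u == v)) := by
  rw [Bool.eq_iff_iff]
  simp only [Bool.and_eq_true, Bool.not_eq_true', Bool.or_eq_false_iff,
    decide_eq_true_eq, decide_eq_false_iff_not, bne_iff_ne, beq_eq_false_iff_ne,
    ge_iff_le, not_lt, not_le]

-- A's edges loop = B's edges loop, then the terminal loop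
theorem pv_edges_key (n : Int) (tps : List (Int × Int)) : ∀ (edges : List (Int × Int)),
    pvAEdges n tps edges = if pvBEdges n edges then pvATerm n PySem.Set.empty tps else false := by
  intro edges
  induction edges with
  | nil => simp [pvAEdges, pvBEdges]
  | cons p rest ih =>
    obtain ⟨u, v⟩ := p
    simp only [pvAEdges, pvBEdges, pv_edge_ok n u v]
    by_cases h1 : (u < 0 || u ≥ n || v < 0 || v ≥ n) = true
    · simp [h1]
    · rw [Bool.not_eq_true] at h1
      by_cases h2 : u = v
      · simp [h1, h2]
      · have h2' : (u == v) = false := by simp [h2]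
        simp [h1, h2', ih]

-- B's adjacent scan on the sorted flattened endpoints decides their Nodup
theorem pv_sorted_scan (xs : List Int) :
    (let terms := PySem.List.sorted xs (fun x => x) false
     (terms.zip (terms.drop 1)).all (fun p => p.1 != p.2)) = decide xs.Nodup := by
  have hperm : (PySem.List.sorted xs (fun x => x) false).Perm xs := PySem.List.sorted_perm ..
  have hpw : (PySem.List.sorted xs (fun x => x) false).Pairwise (· ≤ ·) :=
    PySem.List.sorted_pairwise ..
  have := pv_adj_nodup (PySem.List.sorted xs (fun x => x) false) hpw
  simp only [this]
  rw [Bool.eq_iff_iff]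
  simp only [decide_eq_true_eq]
  exact ⟨fun h => hperm.nodup_iff.mp h, fun h => hperm.nodup_iff.mpr h⟩

-- ===== VERDICT (by name: the statement is the Claim_ definition above) =====
theorem is_valid_target_spec : Claim_equal_is_valid_target := by
  intro n edges tps _
  unfold Spec_is_valid_target is_valid_target is_valid_target_alt
  by_cases hn : n < 2
  · simp [hn]
  · by_cases he : tps.length < 1
    · have hte : tps = [] := by
        cases tps with
        | nil => rfl
        | cons a l => simp at he
      subst hte; simp [hn]
    · have hne : tps.isEmpty = false := by
        cases tps with
        | nil => simp at he
        | cons a l => rfl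
      simp only [hn, if_false, he, hne, Bool.or_false, decide_false]
      rw [pv_edges_key]
      by_cases hE : pvBEdges n edges = true
      · simp only [hE, if_true, Bool.not_true, Bool.false_eq_true, if_false]
        have hempty : (PySem.Set.empty : PySem.Set Int) = ([] : List Int) := rfl
        rw [hempty, pv_term_key n tps [] List.nodup_nil]
        by_cases hT : pvBTerms n tps = true
        · simp only [hT, Bool.true_and, Bool.not_true, Bool.false_eq_true, if_false,
            List.nil_append]
          exact (pv_sorted_scan (tps.flatMap (fun st => [st.1, st.2]))).symm
        · rw [Bool.not_eq_true] at hT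
          simp [hT]
      · rw [Bool.not_eq_true] at hE
        simp [hE]
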